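-- pv_equiv track=rewrite | github.com/notyourgiantcoder/ARYVAX_CHALLENGE | arvyax_pipeline.py | decision
-- ===== SOURCE A (Python) =====
-- WHAT_RULES = [
--     {"state":"overwhelmed", "hi_stress":True,  "hi_intens":True,  "action":"box_breathing"},
--     {"state":"overwhelmed", "lo_energy":True,                      "action":"rest"},
--     {"state":"overwhelmed",                                         "action":"grounding"},
--     {"state":"restless",    "hi_intens":True,                      "action":"box_breathing"},
--     {"state":"restless",    "hi_energy":True,                      "action":"movement"},
--     {"state":"restless",                                            "action":"journaling"},
--     {"state":"focused",     "hi_stress":False, "hi_energy":True,   "action":"deep_work"},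
--     {"state":"focused",                                             "action":"light_planning"},
--     {"state":"calm",        "lo_energy":True,  "is_night":True,    "action":"rest"},
--     {"state":"calm",        "is_morn":True,                        "action":"light_planning"},
--     {"state":"calm",                                                "action":"journaling"},
--     {"state":"mixed",       "hi_stress":True,                      "action":"grounding"},
--     {"state":"mixed",       "hi_energy":True,                      "action":"movement"},
--     {"state":"mixed",                                               "action":"sound_therapy"},
--     {"state":"neutral",     "hi_energy":True,  "is_morn":True,     "action":"light_planning"},
--     {"state":"neutral",     "hi_stress":True,                      "action":"journaling"},
--     {"state":"neutral",                                             "action":"movement"},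
-- ]
--
-- WHEN_RULES = [
--     {"state":"overwhelmed", "hi_intens":True,  "hi_stress":True,   "when":"now"},
--     {"state":"restless",    "hi_intens":True,  "hi_stress":True,   "when":"now"},
--     {"state":"focused",     "what":"deep_work",                     "when":"now"},
--     {                       "what":"rest",     "is_night":True,    "when":"tonight"},
--     {                                          "is_night":True,    "when":"tomorrow_morning"},
--     {"state":"calm",        "hi_intens":False,                      "when":"later_today"},
--     {                       "hi_intens":True,                       "when":"now"},
--     {                       "what":"journaling",                    "when":"later_today"},
--     {                       "what":"sound_therapy",                 "when":"later_today"},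
-- ]
--
-- def _matches(rule, ctx):
--     return all(ctx.get(k) == v for k, v in rule.items() if k not in ("action","when"))
--
-- def decision(state, intensity, stress, energy, tod):
--     ctx = {
--         "state":    state,
--         "hi_stress": float(stress or 3) >= 4,
--         "lo_energy": float(energy or 3) <= 2,
--         "hi_energy": float(energy or 3) >= 4,
--         "hi_intens": int(intensity or 3) >= 4,
--         "is_night":  str(tod).lower() in ("night","evening"),
--         "is_morn":   str(tod).lower() in ("morning","early_morning"),
--     }
--     what = next((r["action"] for r in WHAT_RULES if _matches(r, ctx)), "pause")
--     ctx["what"] = what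
--     when = next((r["when"]   for r in WHEN_RULES if _matches(r, ctx)), "within_15_min")
--     return what, when
-- ===== SOURCE B (Python) =====
-- def decision(state, intensity, stress, energy, tod):
--     hi_stress = float(stress or 3) >= 4
--     lo_energy = float(energy or 3) <= 2
--     hi_energy = float(energy or 3) >= 4
--     hi_intens = int(intensity or 3) >= 4
--     t = str(tod).lower()
--     is_night = t in ("night", "evening")
--     is_morn = t in ("morning", "early_morning")
--
--     if state == "overwhelmed":
--         if hi_stress and hi_intens:
--             what = "box_breathing"
--         elif lo_energy:
--             what = "rest"
--         else:
--             what = "grounding"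
--     elif state == "restless":
--         if hi_intens:
--             what = "box_breathing"
--         elif hi_energy:
--             what = "movement"
--         else:
--             what = "journaling"
--     elif state == "focused":
--         what = "deep_work" if (not hi_stress and hi_energy) else "light_planning"
--     elif state == "calm":
--         if lo_energy and is_night:
--             what = "rest"
--         elif is_morn:
--             what = "light_planning"
--         else:
--             what = "journaling"
--     elif state == "mixed":
--         if hi_stress:
--             what = "grounding"
--         elif hi_energy:
--             what = "movement"
--         else:
--             what = "sound_therapy"
--     elif state == "neutral":
--         if hi_energy and is_morn:
--             what = "light_planning"
--         elif hi_stress: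
--             what = "journaling"
--         else:
--             what = "movement"
--     else:
--         what = "pause"
--
--     if state == "overwhelmed" and hi_intens and hi_stress:
--         when = "now"
--     elif state == "restless" and hi_intens and hi_stress:
--         when = "now"
--     elif state == "focused" and what == "deep_work":
--         when = "now"
--     elif what == "rest" and is_night:
--         when = "tonight"
--     elif is_night:
--         when = "tomorrow_morning"
--     elif state == "calm" and not hi_intens:
--         when = "later_today"
--     elif hi_intens:
--         when = "now"
--     elif what in ("journaling", "sound_therapy"):
--         when = "later_today"
--     else:
--         when = "within_15_min"
--     return what, when
-- ===== Notes on version B (the rewrite author's own statement) =====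
-- stated objective: simpler
-- what changed: Replaces the WHAT_RULES/WHEN_RULES dict tables, the generic _matches predicate and the next(...) first-match scans with two explicit ordered if/elif chains that encode the same precedence directly (keeping the exact `or 3` falsy defaults and str(tod).lower() coercions).
import Mathlib
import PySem

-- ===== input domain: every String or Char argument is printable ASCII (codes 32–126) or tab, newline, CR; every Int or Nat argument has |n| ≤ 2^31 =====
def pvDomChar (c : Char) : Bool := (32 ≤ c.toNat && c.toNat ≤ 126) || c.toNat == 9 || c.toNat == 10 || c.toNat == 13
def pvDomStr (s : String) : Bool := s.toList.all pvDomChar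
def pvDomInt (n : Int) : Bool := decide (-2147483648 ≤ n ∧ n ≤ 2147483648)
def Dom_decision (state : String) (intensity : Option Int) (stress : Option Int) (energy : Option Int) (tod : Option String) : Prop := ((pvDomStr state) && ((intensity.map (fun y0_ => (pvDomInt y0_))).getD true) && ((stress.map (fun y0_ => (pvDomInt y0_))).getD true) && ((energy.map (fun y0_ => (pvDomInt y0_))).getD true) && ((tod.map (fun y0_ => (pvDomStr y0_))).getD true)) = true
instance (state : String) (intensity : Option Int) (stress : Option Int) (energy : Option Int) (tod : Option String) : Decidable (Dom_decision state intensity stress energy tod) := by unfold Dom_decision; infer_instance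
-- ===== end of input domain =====

-- B replaces the first-match scan over the WHAT_RULES/WHEN_RULES tables with two explicit
-- ordered if/elif chains; same return value, no rule tables or generic matcher (objective: simpler).

-- ===== PORT A =====
-- heterogeneous dict value (rules/ctx hold booleans and strings)
inductive PVal
  | b (x : Bool)
  | s (x : String)
deriving DecidableEq, Repr

-- `x or 3` for an optional int: None and 0 are falsy.  float(...) on ints compares exactly,
-- so the float() coercion is ported as Int (exact here: comparisons ≥4/≤2 on integers).
def pyOr3 (o : Option Int) : Int :=
  match o with
  | none => 3
  | some n => if n = 0 then 3 else n

-- str(tod).lower() : None prints as "None"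
def pyStrLower (o : Option String) : String :=
  match o with
  | none => PySem.Str.lower "None"
  | some s => PySem.Str.lower s

def WHAT_RULES : List (List (String × PVal)) :=
  [ [("state", .s "overwhelmed"), ("hi_stress", .b true), ("hi_intens", .b true), ("action", .s "box_breathing")],
    [("state", .s "overwhelmed"), ("lo_energy", .b true), ("action", .s "rest")],
    [("state", .s "overwhelmed"), ("action", .s "grounding")],
    [("state", .s "restless"), ("hi_intens", .b true), ("action", .s "box_breathing")],
    [("state", .s "restless"), ("hi_energy", .b true), ("action", .s "movement")],
    [("state", .s "restless"), ("action", .s "journaling")],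
    [("state", .s "focused"), ("hi_stress", .b false), ("hi_energy", .b true), ("action", .s "deep_work")],
    [("state", .s "focused"), ("action", .s "light_planning")],
    [("state", .s "calm"), ("lo_energy", .b true), ("is_night", .b true), ("action", .s "rest")],
    [("state", .s "calm"), ("is_morn", .b true), ("action", .s "light_planning")],
    [("state", .s "calm"), ("action", .s "journaling")],
    [("state", .s "mixed"), ("hi_stress", .b true), ("action", .s "grounding")],
    [("state", .s "mixed"), ("hi_energy", .b true), ("action", .s "movement")],
    [("state", .s "mixed"), ("action", .s "sound_therapy")],
    [("state", .s "neutral"), ("hi_energy", .b true), ("is_morn", .b true), ("action", .s "light_planning")],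
    [("state", .s "neutral"), ("hi_stress", .b true), ("action", .s "journaling")],
    [("state", .s "neutral"), ("action", .s "movement")] ]

def WHEN_RULES : List (List (String × PVal)) :=
  [ [("state", .s "overwhelmed"), ("hi_intens", .b true), ("hi_stress", .b true), ("when", .s "now")],
    [("state", .s "restless"), ("hi_intens", .b true), ("hi_stress", .b true), ("when", .s "now")],
    [("state", .s "focused"), ("what", .s "deep_work"), ("when", .s "now")],
    [("what", .s "rest"), ("is_night", .b true), ("when", .s "tonight")],
    [("is_night", .b true), ("when", .s "tomorrow_morning")],
    [("state", .s "calm"), ("hi_intens", .b false), ("when", .s "later_today")],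
    [("hi_intens", .b true), ("when", .s "now")],
    [("what", .s "journaling"), ("when", .s "later_today")],
    [("what", .s "sound_therapy"), ("when", .s "later_today")] ]

def pvMatches (rule : List (String × PVal)) (ctx : PySem.Dict String PVal) : Bool :=
  rule.all (fun kv =>
    if kv.1 = "action" ∨ kv.1 = "when" then true
    else ctx.get? kv.1 == some kv.2)

-- next((r[key] for r in rules if _matches(r, ctx)), default)
def pvFirstMatch (rules : List (List (String × PVal))) (ctx : PySem.Dict String PVal)
    (key : String) (dflt : String) : String :=
  match rules.find? (fun r => pvMatches r ctx) with
  | none => dflt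
  | some r =>
    match (PySem.Dict.mk r).get? key with
    | some (.s a) => a
    | _ => dflt   -- unreachable: every rule carries its action/when string

def decision (state : String) (intensity : Option Int) (stress : Option Int) (energy : Option Int) (tod : Option String) : String × String :=
  let ctx : PySem.Dict String PVal := PySem.Dict.mk
    [ ("state", .s state),
      ("hi_stress", .b (decide (pyOr3 stress ≥ 4))),
      ("lo_energy", .b (decide (pyOr3 energy ≤ 2))),
      ("hi_energy", .b (decide (pyOr3 energy ≥ 4))),
      ("hi_intens", .b (decide (pyOr3 intensity ≥ 4))),
      ("is_night", .b ((pyStrLower tod == "night") || (pyStrLower tod == "evening"))),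
      ("is_morn", .b ((pyStrLower tod == "morning") || (pyStrLower tod == "early_morning"))) ]
  let what := pvFirstMatch WHAT_RULES ctx "action" "pause"
  let ctx2 := ctx.insert "what" (.s what)
  let when_ := pvFirstMatch WHEN_RULES ctx2 "when" "within_15_min"
  (what, when_)

-- ===== PORT B =====
def decision_alt (state : String) (intensity : Option Int) (stress : Option Int) (energy : Option Int) (tod : Option String) : String × String :=
  let hi_stress : Bool := decide (pyOr3 stress ≥ 4)
  let lo_energy : Bool := decide (pyOr3 energy ≤ 2)
  let hi_energy : Bool := decide (pyOr3 energy ≥ 4)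
  let hi_intens : Bool := decide (pyOr3 intensity ≥ 4)
  let t := pyStrLower tod
  let is_night : Bool := (t == "night") || (t == "evening")
  let is_morn : Bool := (t == "morning") || (t == "early_morning")
  let what : String :=
    if state == "overwhelmed" then
      if hi_stress && hi_intens then "box_breathing"
      else if lo_energy then "rest"
      else "grounding"
    else if state == "restless" then
      if hi_intens then "box_breathing"
      else if hi_energy then "movement"
      else "journaling"
    else if state == "focused" then
      if !hi_stress && hi_energy then "deep_work" else "light_planning"
    else if state == "calm" then
      if lo_energy && is_night then "rest"
      else if is_morn then "light_planning"
      else "journaling"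
    else if state == "mixed" then
      if hi_stress then "grounding"
      else if hi_energy then "movement"
      else "sound_therapy"
    else if state == "neutral" then
      if hi_energy && is_morn then "light_planning"
      else if hi_stress then "journaling"
      else "movement"
    else "pause"
  let when_ : String :=
    if (state == "overwhelmed") && hi_intens && hi_stress then "now"
    else if (state == "restless") && hi_intens && hi_stress then "now"
    else if (state == "focused") && (what == "deep_work") then "now"
    else if (what == "rest") && is_night then "tonight"
    else if is_night then "tomorrow_morning"
    else if (state == "calm") && !hi_intens then "later_today"
    else if hi_intens then "now"
    else if (what == "journaling") || (what == "sound_therapy") then "later_today"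
    else "within_15_min"
  (what, when_)

-- ===== PRECONDITION & SPEC =====
def Spec_decision (state : String) (intensity : Option Int) (stress : Option Int) (energy : Option Int) (tod : Option String) (out : String × String) : Prop := out = decision_alt state intensity stress energy tod
instance (state : String) (intensity : Option Int) (stress : Option Int) (energy : Option Int) (tod : Option String) (out : String × String) : Decidable (Spec_decision state intensity stress energy tod out) := by unfold Spec_decision; infer_instance

-- ===== CLAIM (what is proved, stated in full; the proofs are below) =====
def Claim_equal_decision : Prop := ∀ (state : String) (intensity : Option Int) (stress : Option Int) (energy : Option Int) (tod : Option String), Dom_decision state intensity stress energy tod → Spec_decision state intensity stress energy tod (decision state intensity stress energy tod)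

-- ===== LEMMAS AND PROOFS =====

-- ===== VERDICT (by name: the statement is the Claim_ definition above) =====
theorem decision_spec : Claim_equal_decision := by
  intro state intensity stress energy tod _
  unfold Spec_decision decision decision_alt
  simp only []
  generalize (decide (pyOr3 stress ≥ 4) : Bool) = hs
  generalize (decide (pyOr3 energy ≤ 2) : Bool) = le
  generalize (decide (pyOr3 energy ≥ 4) : Bool) = he
  generalize (decide (pyOr3 intensity ≥ 4) : Bool) = hi
  generalize ((pyStrLower tod == "night") || (pyStrLower tod == "evening") : Bool) = ni
  generalize ((pyStrLower tod == "morning") || (pyStrLower tod == "early_morning") : Bool) = mo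
  by_cases h1 : state = "overwhelmed"
  · subst h1; cases hs <;> cases le <;> cases he <;> cases hi <;> cases ni <;> cases mo <;> decide
  by_cases h2 : state = "restless"
  · subst h2; cases hs <;> cases le <;> cases he <;> cases hi <;> cases ni <;> cases mo <;> decide
  by_cases h3 : state = "focused"
  · subst h3; cases hs <;> cases le <;> cases he <;> cases hi <;> cases ni <;> cases mo <;> decide
  by_cases h4 : state = "calm"
  · subst h4; cases hs <;> cases le <;> cases he <;> cases hi <;> cases ni <;> cases mo <;> decide
  by_cases h5 : state = "mixed"
  · subst h5; cases hs <;> cases le <;> cases he <;> cases hi <;> cases ni <;> cases mo <;> decide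
  by_cases h6 : state = "neutral"
  · subst h6; cases hs <;> cases le <;> cases he <;> cases hi <;> cases ni <;> cases mo <;> decide
  have f1 : (some (PVal.s state) == some (PVal.s "overwhelmed")) = false := by simp [h1]
  have f2 : (some (PVal.s state) == some (PVal.s "restless")) = false := by simp [h2]
  have f3 : (some (PVal.s state) == some (PVal.s "focused")) = false := by simp [h3]
  have f4 : (some (PVal.s state) == some (PVal.s "calm")) = false := by simp [h4]
  have f5 : (some (PVal.s state) == some (PVal.s "mixed")) = false := by simp [h5]
  have f6 : (some (PVal.s state) == some (PVal.s "neutral")) = false := by simp [h6]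
  cases ni <;> cases hi <;>
    simp [pvFirstMatch, pvMatches, WHAT_RULES, WHEN_RULES, PySem.Dict.insert,
      List.find?, List.all_cons, PySem.Dict.get?_mk_cons, f1, f2, f3, f4, f5, f6, h1, h2, h3, h4, h5, h6] <;> decide
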